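-- pv_equiv track=rewrite | github.com/yakin-ts/Competitive-programming | week4/arrays_matrices/count_distinct_integers.py | countDistinctIntegers
-- ===== SOURCE A (Python) =====
-- from typing import List
--
-- def countDistinctIntegers(nums: List[int]) -> int:
--     leng = len(nums)
--     unique = {}
--     count_unique = 0
--
--     for i in range (leng):
--         new_int = str(nums[i])
--         nums.append(int(new_int[::-1]))
--
--     for i, num in enumerate(nums):
--         if num not in unique:
--             unique[num] = 1
--             count_unique +=1
--
--     return count_unique
-- ===== SOURCE B (Python) =====
-- from typing import List
--
-- def countDistinctIntegers(nums: List[int]) -> int: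
--     # sort-and-scan distinct count instead of A's hash-dict pass; does not mutate nums
--     ext = nums + [int(str(x)[::-1]) for x in nums]
--     srt = sorted(ext)
--     if not srt:
--         return 0
--     count = 1
--     for a, b in zip(srt, srt[1:]):
--         if a != b:
--             count += 1
--     return count
-- ===== Notes on version B (the rewrite author's own statement) =====
-- stated objective: alternative
-- what changed: B counts the distinct values of the reversal-extended list by sorting a copy and scanning adjacent pairs instead of A's insertion-order dict membership pass; B also builds the extension as a list comprehension rather than A's in-place append loop (A mutates nums, B does not).
import Mathlib
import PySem

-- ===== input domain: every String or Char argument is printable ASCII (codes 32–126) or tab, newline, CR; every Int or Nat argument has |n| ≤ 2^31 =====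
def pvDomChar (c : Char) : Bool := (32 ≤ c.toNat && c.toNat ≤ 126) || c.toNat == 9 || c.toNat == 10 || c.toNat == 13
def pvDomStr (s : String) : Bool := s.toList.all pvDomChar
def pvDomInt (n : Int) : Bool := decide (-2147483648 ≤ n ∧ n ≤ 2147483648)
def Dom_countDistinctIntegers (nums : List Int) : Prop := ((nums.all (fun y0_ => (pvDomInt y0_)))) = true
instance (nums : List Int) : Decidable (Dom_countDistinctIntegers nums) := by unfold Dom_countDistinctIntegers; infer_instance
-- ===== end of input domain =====

-- B replaces A's dict-membership distinct count by sorting a copy and scanning adjacent pairs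
-- (alternative decomposition, not faster); A mutates nums in place (appends reversals), B does not:
-- the equivalence proved here is about the RETURN value only.

-- ===== PORT A =====
-- int(str(x)[::-1]); s[::-1] is reverse (PySem.Str.slice?_none_none_neg_one); .getD 0 is only
-- reached where Python raises ValueError (negative x), excluded by Pre_.
def pvRevIntA (x : Int) : Int :=
  (PySem.Int.ofChars? (PySem.Int.toChars x).reverse).getD 0

def countDistinctIntegers (nums : List Int) : Int :=
  let leng : Int := (nums.length : Int)
  -- for i in range(leng): nums.append(int(str(nums[i])[::-1]))  — the list is the loop state
  let nums2 := (PySem.List.pyRange 0 leng 1).foldl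
      (fun acc i => acc ++ [pvRevIntA (PySem.List.pyGetD acc i 0)]) nums
  -- for i, num in enumerate(nums): if num not in unique: unique[num] = 1; count_unique += 1
  let st := (PySem.List.enumerate nums2).foldl
      (fun (st : PySem.Dict Int Int × Int) p =>
        if st.1.contains p.2 then st else (st.1.insert p.2 1, st.2 + 1))
      (PySem.Dict.empty, 0)
  st.2

-- ===== PORT B =====
-- Source B's comprehension contains the identical subexpression int(str(x)[::-1]); shared helper pvRevIntA
def countDistinctIntegers_alt (nums : List Int) : Int :=
  let ext := nums ++ nums.map pvRevIntA
  let srt := PySem.List.sorted ext (fun x => x) false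
  if srt = [] then 0
  else 1 + (srt.zip srt.tail).foldl (fun c p => if p.1 ≠ p.2 then c + 1 else c) 0

-- ===== PRECONDITION & SPEC =====
-- Pre_ excludes exactly the inputs where Python A raises: a negative element makes
-- int(str(x)[::-1]) a ValueError ("21-"); B raises there too.
def Pre_countDistinctIntegers (nums : List Int) : Prop := ∀ x ∈ nums, 0 ≤ x
instance (nums : List Int) : Decidable (Pre_countDistinctIntegers nums) := by
  unfold Pre_countDistinctIntegers; infer_instance

def pvWitness_countDistinctIntegers : List Int := [12, 21, 3, 0]

def Spec_countDistinctIntegers (nums : List Int) (out : Int) : Prop := out = countDistinctIntegers_alt nums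
instance (nums : List Int) (out : Int) : Decidable (Spec_countDistinctIntegers nums out) := by unfold Spec_countDistinctIntegers; infer_instance

-- ===== CLAIM (what is proved, stated in full; the proofs are below) =====
def Claim_equal_countDistinctIntegers : Prop := ∀ (nums : List Int), Dom_countDistinctIntegers nums → Pre_countDistinctIntegers nums → Spec_countDistinctIntegers nums (countDistinctIntegers nums)

-- ===== LEMMAS AND PROOFS =====

-- A's append loop builds exactly nums ++ map pvRevIntA nums.
theorem pvExtA_take (nums : List Int) (k : Nat) (hk : k ≤ nums.length) :
    (PySem.List.pyRange 0 (k : Int) 1).foldl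
      (fun acc i => acc ++ [pvRevIntA (PySem.List.pyGetD acc i 0)]) nums
    = nums ++ (nums.take k).map pvRevIntA := by
  induction k with
  | zero => simp [PySem.List.pyRange]
  | succ k ih =>
    have hk' : k ≤ nums.length := Nat.le_of_succ_le hk
    have hcast : ((k + 1 : Nat) : Int) = (k : Int) + 1 := by push_cast; ring
    rw [hcast, PySem.List.pyRange_one_succ_right (by positivity), List.foldl_append,
        ih hk']
    have hget : PySem.List.pyGetD (nums ++ (nums.take k).map pvRevIntA) (k : Int) 0
        = nums.getD k 0 := by
      rw [PySem.List.pyGetD_natCast]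
      simp [List.getD, List.getElem?_append_left (by omega : k < nums.length)]
    have htake : nums.take (k + 1) = nums.take k ++ [nums.getD k 0] := by
      have hlt : k < nums.length := by omega
      rw [List.take_add_one]
      simp [List.getElem?_eq_getElem hlt, List.getD, Option.toList]
    rw [List.foldl_cons, List.foldl_nil, hget, htake, List.map_append, List.map_cons,
        List.map_nil, List.append_assoc]

-- the dict-membership counting loop counts the distinct elements not already among the keys
theorem pvCountA_fold (L : List Int) :
    ∀ (d : PySem.Dict Int Int) (c : Int),
    (L.foldl (fun (st : PySem.Dict Int Int × Int) x =>
        if st.1.contains x then st else (st.1.insert x 1, st.2 + 1)) (d, c)).2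
    = c + ((L.toFinset \ d.keys.toFinset).card : Int) := by
  induction L with
  | nil => simp
  | cons x t ih =>
    intro d c
    by_cases hx : d.contains x
    · have hmem : x ∈ d.keys := (PySem.Dict.contains_iff_mem_keys d x).mp hx
      simp only [List.foldl_cons, hx, if_true, ih]
      rw [List.toFinset_cons,
          Finset.insert_sdiff_of_mem _ (List.mem_toFinset.mpr hmem)]
    · have hx' : d.contains x = false := by simpa using hx
      simp only [List.foldl_cons, hx', Bool.false_eq_true, if_false, ih]
      rw [PySem.Dict.keys_insert_of_not_contains d 1 hx']
      have hxk : x ∉ d.keys.toFinset := by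
        simp only [List.mem_toFinset]
        exact fun h => hx ((PySem.Dict.contains_iff_mem_keys d x).mpr h)
      have h1 : (x :: t).toFinset \ d.keys.toFinset
          = insert x (t.toFinset \ d.keys.toFinset) := by
        rw [List.toFinset_cons, Finset.insert_sdiff_of_notMem _ (by simpa using hxk)]
      have h2 : t.toFinset \ (d.keys ++ [x]).toFinset
          = (t.toFinset \ d.keys.toFinset).erase x := by
        simp [Finset.sdiff_insert]
      rw [h1, h2]
      by_cases hxt : x ∈ t.toFinset \ d.keys.toFinset
      · rw [Finset.insert_eq_self.mpr hxt]
        have := Finset.card_erase_add_one hxt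
        push_cast [← this]; ring
      · rw [Finset.card_insert_of_notMem hxt, Finset.erase_eq_of_notMem hxt]
        push_cast; ring

-- the index from enumerate is unused: the fold over enumerate is the fold over the list
theorem pvEnum_fold (L : List Int) :
    ∀ (s : Int) (st : PySem.Dict Int Int × Int),
    (PySem.List.enumerate L s).foldl
      (fun (st : PySem.Dict Int Int × Int) p =>
        if st.1.contains p.2 then st else (st.1.insert p.2 1, st.2 + 1)) st
    = L.foldl (fun (st : PySem.Dict Int Int × Int) x =>
        if st.1.contains x then st else (st.1.insert x 1, st.2 + 1)) st := by
  induction L with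
  | nil => intro s st; simp
  | cons x t ih => intro s st; simp only [PySem.List.enumerate_cons, List.foldl_cons, ih]

-- B's adjacent-pair scan on a ≤-sorted nonempty list counts its distinct values
theorem pvAdjCount (s : List Int) (hs : s.Pairwise (· ≤ ·)) (hne : s ≠ []) :
    1 + ((s.zip s.tail).countP (fun p => p.1 ≠ p.2) : Int) = (s.toFinset.card : Int) := by
  induction s with
  | nil => exact absurd rfl hne
  | cons x t ih =>
    match t, hs with
    | [], _ => simp
    | y :: t', hs =>
      have hxy : x ≤ y := (List.pairwise_cons.mp hs).1 y (by simp)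
      have hs' : (y :: t').Pairwise (· ≤ ·) := (List.pairwise_cons.mp hs).2
      have ihy := ih hs' (by simp)
      simp only [List.tail_cons, List.zip_cons_cons, List.countP_cons]
      by_cases hxyeq : x = y
      · subst hxyeq
        have : (x :: x :: t').toFinset = (x :: t').toFinset := by simp
        rw [this, ← ihy]
        simp
      · have hxlt : x < y := lt_of_le_of_ne hxy hxyeq
        have hxnot : x ∉ (y :: t').toFinset := by
          simp only [List.mem_toFinset, List.mem_cons]
          rintro (rfl | hmem)
          · exact hxyeq rfl
          · exact absurd rfl (ne_of_gt (lt_of_lt_of_le hxlt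
              ((List.pairwise_cons.mp hs').1 x hmem)))
        rw [List.toFinset_cons, Finset.card_insert_of_notMem hxnot]
        simp only [List.tail_cons] at ihy
        simp only [ne_eq] at ihy ⊢
        simp only [hxyeq, not_false_iff, decide_true, if_true]
        push_cast at ihy ⊢
        omega

-- ===== VERDICT (by name: the statement is the Claim_ definition above) =====
theorem countDistinctIntegers_spec : Claim_equal_countDistinctIntegers := by
  intro nums _ _
  simp only [Spec_countDistinctIntegers, countDistinctIntegers, countDistinctIntegers_alt]
  rw [pvExtA_take nums nums.length (le_refl _), List.take_length, pvEnum_fold, pvCountA_fold]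
  simp only [PySem.Dict.keys_empty, List.toFinset_nil, Finset.sdiff_empty, zero_add]
  by_cases h0 : PySem.List.sorted (nums ++ nums.map pvRevIntA) (fun x => x) false = []
  · rw [if_pos h0]
    have hnil : nums ++ nums.map pvRevIntA = [] :=
      (PySem.List.sorted_eq_nil_iff _ _ _).mp h0
    simp [hnil]
  · rw [if_neg h0]
    have hperm := PySem.List.sorted_perm (nums ++ nums.map pvRevIntA) (fun x : Int => x) false
    have hpw := PySem.List.sorted_pairwise (nums ++ nums.map pvRevIntA) (fun x : Int => x)
    have hadj := pvAdjCount _ hpw h0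
    have hfin := List.toFinset_eq_of_perm _ _ hperm
    rw [hfin] at hadj
    have hcnt : ∀ (l : List (Int × Int)) (c : Int),
        l.foldl (fun c p => if p.1 ≠ p.2 then c + 1 else c) c
        = c + (l.countP (fun p => decide (p.1 ≠ p.2)) : Int) := by
      intro l c
      have := PySem.List.foldl_count_if (fun p : Int × Int => decide (p.1 ≠ p.2)) l c
      simpa using this
    rw [hcnt]
    simp only [ne_eq] at hadj ⊢
    omega
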